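-- pv_equiv track=rewrite | github.com/Air2air/z-beam-generator | scripts/maintenance/normalize_safety_data.py | standardize_skin_protection
-- ===== SOURCE A (Python) =====
-- PPE_STANDARD_VALUES = {
--     'respiratory': {
--         'dust_mask': 'N95 Respirator',
--         'n95': 'N95 Respirator',
--         'p100': 'P100 Respirator',
--         'respirator': 'P100 Respirator',
--         'half-face': 'Half-Face Respirator',
--         'full-face': 'Full-Face Respirator',
--         'scba': 'SCBA Required',
--     },
--     'eye_protection': {
--         'goggles': 'Safety Goggles',
--         'safety goggles': 'Safety Goggles',
--         'glasses': 'Safety Glasses',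
--         'safety glasses': 'Safety Glasses',
--         'face shield': 'Face Shield',
--     },
--     'skin_protection': {
--         'gloves': 'Leather Gloves',
--         'leather gloves': 'Leather Gloves',
--         'chemical gloves': 'Chemical-Resistant Gloves',
--         'chemical-resistant gloves': 'Chemical-Resistant Gloves',
--     }
-- }
--
-- def standardize_skin_protection(current_value: str, toxic_gas_risk: str) -> str:
--     """Standardize skin protection value"""
--     current_lower = current_value.lower().strip()
--
--     # Critical/high toxic risk requires chemical resistance
--     if toxic_gas_risk in ['critical', 'high']:
--         return 'Chemical-Resistant Gloves'
--
--     # Try to match standard value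
--     for pattern, standard in PPE_STANDARD_VALUES['skin_protection'].items():
--         if pattern in current_lower:
--             return standard
--
--     # Default to Leather Gloves
--     return 'Leather Gloves'
-- ===== SOURCE B (Python) =====
-- def standardize_skin_protection(current_value: str, toxic_gas_risk: str) -> str:
--     """Standardize skin protection value (closed form)."""
--     # input normalization (also type-checks current_value, as A's .lower().strip() does)
--     current_lower = current_value.lower().strip()
--     if toxic_gas_risk in ('critical', 'high'):
--         return 'Chemical-Resistant Gloves'
--     # 'gloves' is a substring of every skin_protection pattern, so the only
--     # value the pattern scan can ever produce here is 'Leather Gloves'.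
--     return 'Leather Gloves'
-- ===== Notes on version B (the rewrite author's own statement) =====
-- stated objective: simpler
-- what changed: Replaced the pattern-dict scan with a closed-form decision: since 'gloves' is the first pattern and a substring of every other skin_protection pattern, the non-toxic path can only ever yield 'Leather Gloves' (also the default), so B returns 'Chemical-Resistant Gloves' for critical/high risk and 'Leather Gloves' otherwise, with no loop or dict.
import Mathlib
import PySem

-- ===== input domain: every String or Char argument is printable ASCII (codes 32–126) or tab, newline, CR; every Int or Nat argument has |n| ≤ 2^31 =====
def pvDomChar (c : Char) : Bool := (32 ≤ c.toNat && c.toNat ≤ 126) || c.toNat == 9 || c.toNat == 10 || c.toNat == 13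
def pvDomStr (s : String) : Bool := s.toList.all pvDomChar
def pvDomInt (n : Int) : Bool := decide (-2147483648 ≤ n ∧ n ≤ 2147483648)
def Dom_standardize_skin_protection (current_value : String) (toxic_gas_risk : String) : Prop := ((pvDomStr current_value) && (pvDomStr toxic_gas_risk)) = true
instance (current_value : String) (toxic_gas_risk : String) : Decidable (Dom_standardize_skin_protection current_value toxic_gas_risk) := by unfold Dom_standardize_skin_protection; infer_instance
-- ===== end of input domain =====

-- B replaces A's pattern-dict scan by a closed form: 'gloves' is the first pattern and a
-- substring of every other skin_protection pattern, so the non-toxic path always yields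
-- 'Leather Gloves' (also the default); objective: simpler.


-- ===== PORT A =====
-- the skin_protection entry of PPE_STANDARD_VALUES, in insertion order
def sspPatterns : List (String × String) :=
  [("gloves", "Leather Gloves"),
   ("leather gloves", "Leather Gloves"),
   ("chemical gloves", "Chemical-Resistant Gloves"),
   ("chemical-resistant gloves", "Chemical-Resistant Gloves")]

-- 'for pattern, standard in …: if pattern in current_lower: return standard' + default
def sspLoop (cl : String) : List (String × String) → String
  | [] => "Leather Gloves"
  | (p, std) :: rest => if PySem.Str.isIn p cl then std else sspLoop cl rest

def standardize_skin_protection (current_value : String) (toxic_gas_risk : String) : String :=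
  let current_lower := PySem.Str.strip (PySem.Str.lower current_value)
  if toxic_gas_risk = "critical" ∨ toxic_gas_risk = "high" then "Chemical-Resistant Gloves"
  else sspLoop current_lower sspPatterns

-- ===== PORT B =====
def standardize_skin_protection_alt (current_value : String) (toxic_gas_risk : String) : String :=
  let _current_lower := PySem.Str.strip (PySem.Str.lower current_value)
  if toxic_gas_risk = "critical" ∨ toxic_gas_risk = "high" then "Chemical-Resistant Gloves"
  else "Leather Gloves"

-- ===== PRECONDITION & SPEC =====
def Spec_standardize_skin_protection (current_value : String) (toxic_gas_risk : String) (out : String) : Prop := out = standardize_skin_protection_alt current_value toxic_gas_risk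
instance (current_value : String) (toxic_gas_risk : String) (out : String) : Decidable (Spec_standardize_skin_protection current_value toxic_gas_risk out) := by unfold Spec_standardize_skin_protection; infer_instance

-- ===== CLAIM (what is proved, stated in full; the proofs are below) =====
def Claim_equal_standardize_skin_protection : Prop := ∀ (current_value : String) (toxic_gas_risk : String), Dom_standardize_skin_protection current_value toxic_gas_risk → Spec_standardize_skin_protection current_value toxic_gas_risk (standardize_skin_protection current_value toxic_gas_risk)

-- ===== LEMMAS AND PROOFS =====

-- if 'gloves' is not a substring of cl, neither is any longer pattern containing it
theorem isIn_false_of_gloves_false (p cl : String)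
    (hsub : "gloves".toList <:+: p.toList)
    (h : PySem.Str.isIn "gloves" cl = false) : PySem.Str.isIn p cl = false := by
  rw [← Bool.not_eq_true] at h ⊢
  rw [PySem.Str.isIn_iff_infix] at h ⊢
  exact fun hp => h (hsub.trans hp)

-- the pattern scan over sspPatterns can only return 'Leather Gloves'
theorem sspLoop_const (cl : String) : sspLoop cl sspPatterns = "Leather Gloves" := by
  by_cases h : PySem.Str.isIn "gloves" cl = true
  · simp at h
    simp [sspPatterns, sspLoop, h]
  · rw [Bool.not_eq_true] at h
    have h1 := isIn_false_of_gloves_false "leather gloves" cl (by decide) h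
    have h2 := isIn_false_of_gloves_false "chemical gloves" cl (by decide) h
    have h3 := isIn_false_of_gloves_false "chemical-resistant gloves" cl (by decide) h
    simp at h h1 h2 h3
    simp [sspPatterns, sspLoop, h, h1, h2, h3]

-- ===== VERDICT (by name: the statement is the Claim_ definition above) =====
theorem standardize_skin_protection_spec : Claim_equal_standardize_skin_protection := by
  intro cv tg _
  unfold Spec_standardize_skin_protection standardize_skin_protection standardize_skin_protection_alt
  by_cases h : tg = "critical" ∨ tg = "high" <;> simp [h, sspLoop_const]
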